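-- pv_equiv track=rewrite | github.com/wheresbarney/AdventOfCode2023 | day14/day14.py | parse
-- ===== SOURCE A (Python) =====
-- def parse(input):
--     rounds = [
--         (x, y)
--         for y in range(len(input))
--         for x in range(len(input[0]))
--         if input[y][x] == "O"
--     ]
--
--     squares = [
--         (x, y)
--         for y in range(len(input))
--         for x in range(len(input[0]))
--         if input[y][x] == "#"
--     ]
--     return tuple(rounds), tuple(squares)
-- ===== SOURCE B (Python) =====
-- def parse(input):
--     rounds = []
--     squares = []
--     width = len(input[0]) if input else 0
--     for y, row in enumerate(input):
--         for x, c in enumerate(row[:width]):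
--             if c == "O":
--                 rounds.append((x, y))
--             elif c == "#":
--                 squares.append((x, y))
--     return tuple(rounds), tuple(squares)
-- ===== Notes on version B (the rewrite author's own statement) =====
-- stated objective: faster
-- what changed: Replaced the two full-grid list comprehensions (one scan for 'O', a second for '#') by a single row-major traversal with two accumulator lists, reading each cell once (constant-factor: one grid pass and one indexing per cell instead of two).
import Mathlib
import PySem

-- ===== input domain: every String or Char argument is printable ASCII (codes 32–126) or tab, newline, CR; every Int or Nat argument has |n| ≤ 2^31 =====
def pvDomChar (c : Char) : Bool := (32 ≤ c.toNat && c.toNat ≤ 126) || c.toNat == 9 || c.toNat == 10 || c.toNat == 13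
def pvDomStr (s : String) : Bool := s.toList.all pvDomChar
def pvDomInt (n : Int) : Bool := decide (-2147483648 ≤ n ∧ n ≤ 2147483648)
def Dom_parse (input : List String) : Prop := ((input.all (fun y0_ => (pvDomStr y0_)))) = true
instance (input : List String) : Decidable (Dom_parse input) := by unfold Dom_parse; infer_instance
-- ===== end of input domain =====

-- B makes one row-major pass building both coordinate lists at once instead of A's two
-- full-grid comprehensions (objective: faster by a constant factor — each cell is read once).

-- len(input[0]) as both Pythons use it; 0 when input = [] (A never evaluates it then,
-- B's 'if input else 0' makes it explicit).
def pvWidth (input : List String) : Nat :=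
  match input with
  | [] => 0
  | r :: _ => r.toList.length

-- ===== PORT A =====
def parse (input : List String) : (List (Int × Int)) × (List (Int × Int)) :=
  let n : Int := input.length
  let w : Int := (pvWidth input : Int)
  -- [(x, y) for y in range(len(input)) for x in range(len(input[0])) if input[y][x] == "O"]
  -- input[y] is in range by the loop bound (total form pyGetD); input[y][x] may raise: pyGet?
  let rounds := (PySem.List.pyRange 0 n 1).flatMap (fun y =>
    (PySem.List.pyRange 0 w 1).filterMap (fun x =>
      if PySem.Str.pyGet? (PySem.List.pyGetD input y "") x = some 'O' then some (x, y) else none))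
  let squares := (PySem.List.pyRange 0 n 1).flatMap (fun y =>
    (PySem.List.pyRange 0 w 1).filterMap (fun x =>
      if PySem.Str.pyGet? (PySem.List.pyGetD input y "") x = some '#' then some (x, y) else none))
  (rounds, squares)

-- ===== PORT B =====
-- row[:width] is the prefix of width characters (slice with Nat bound = take)
def parse_alt (input : List String) : (List (Int × Int)) × (List (Int × Int)) :=
  let w : Nat := pvWidth input
  (PySem.List.enumerate input 0).foldl (fun acc p =>
    (PySem.List.enumerate (p.2.toList.take w) 0).foldl (fun acc2 q =>
      if q.2 = 'O' then (acc2.1 ++ [(q.1, p.1)], acc2.2)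
      else if q.2 = '#' then (acc2.1, acc2.2 ++ [(q.1, p.1)]) else acc2) acc) ([], [])

-- ===== PRECONDITION & SPEC =====
-- A raises IndexError at input[y][x] exactly when some row is shorter than the first row;
-- Pre_ excludes those grids (A returns on every other input).
def Pre_parse (input : List String) : Prop :=
  ∀ row ∈ input, pvWidth input ≤ row.toList.length
instance (input : List String) : Decidable (Pre_parse input) := by unfold Pre_parse; infer_instance
def pvWitness_parse : List String := ["O#", ".O"]

def Spec_parse (input : List String) (out : (List (Int × Int)) × (List (Int × Int))) : Prop := out = parse_alt input
instance (input : List String) (out : (List (Int × Int)) × (List (Int × Int))) : Decidable (Spec_parse input out) := by unfold Spec_parse; infer_instance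

-- ===== CLAIM (what is proved, stated in full; the proofs are below) =====
def Claim_equal_parse : Prop := ∀ (input : List String), Dom_parse input → Pre_parse input → Spec_parse input (parse input)

-- ===== LEMMAS AND PROOFS =====

-- B's inner loop: appending to one of two accumulators is a pair of filterMaps
theorem inner_foldl (y : Int) (l : List (Int × Char)) (acc : (List (Int × Int)) × (List (Int × Int))) :
    l.foldl (fun acc2 q =>
      if q.2 = 'O' then (acc2.1 ++ [(q.1, y)], acc2.2)
      else if q.2 = '#' then (acc2.1, acc2.2 ++ [(q.1, y)]) else acc2) acc
    = (acc.1 ++ l.filterMap (fun q => if q.2 = 'O' then some (q.1, y) else none),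
       acc.2 ++ l.filterMap (fun q => if q.2 = '#' then some (q.1, y) else none)) := by
  induction l generalizing acc with
  | nil => simp
  | cons q t ih =>
    by_cases hO : q.2 = 'O'
    · have hH : ¬ q.2 = '#' := by rw [hO]; decide
      simp [List.foldl_cons, hO, ih]
    · by_cases hH : q.2 = '#'
      · simp [List.foldl_cons, hH, ih]
      · simp [List.foldl_cons, hO, hH, ih]

-- B's outer loop: per-row pairwise appends are a pair of flatMaps
theorem outer_foldl {γ : Type} (rA sA : γ → List (Int × Int)) (rows : List γ)
    (acc : (List (Int × Int)) × (List (Int × Int))) :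
    rows.foldl (fun acc p => (acc.1 ++ rA p, acc.2 ++ sA p)) acc
    = (acc.1 ++ rows.flatMap rA, acc.2 ++ rows.flatMap sA) := by
  induction rows generalizing acc with
  | nil => simp
  | cons p t ih => simp [List.foldl_cons, ih]

-- A's outer index loop as a loop over enumerate(input)
theorem a_to_enum {β : Type} (input : List String) (f : Int → String → List β) :
    (PySem.List.pyRange 0 (input.length : Int) 1).flatMap (fun y => f y (PySem.List.pyGetD input y "")) =
    (PySem.List.enumerate input 0).flatMap (fun p => f p.1 p.2) := by
  rw [PySem.List.enumerate_eq_map_pyRange input ""]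
  rw [List.flatMap_map]
  simp [PySem.List.len_eq]

-- per-row equality: A's index scan over range(w) = B's scan of enumerate(row[:w]),
-- for a row at least w long
theorem row_eq (c : Char) (y : Int) (row : String) (w : Nat) (h : w ≤ row.toList.length) :
    (PySem.List.pyRange 0 (w : Int) 1).filterMap (fun x =>
      if PySem.Str.pyGet? row x = some c then some (x, y) else none)
    = (PySem.List.enumerate (row.toList.take w) 0).filterMap (fun q =>
      if q.2 = c then some (q.1, y) else none) := by
  rw [PySem.List.enumerate_eq_map_pyRange (row.toList.take w) ' ']
  rw [List.filterMap_map]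
  have hlen : PySem.List.len (row.toList.take w) = (w : Int) := by
    rw [PySem.List.len_eq, List.length_take]; omega
  rw [hlen]
  apply List.filterMap_congr
  intro x hx
  rw [PySem.List.mem_pyRange_one] at hx
  obtain ⟨hx0, hxw'⟩ := hx
  have hxw : x.toNat < w := by omega
  have hxl : x.toNat < row.toList.length := by omega
  have hx' : x = ((x.toNat : Nat) : Int) := by omega
  have hget : PySem.List.pyGet? row.toList x = some (row.toList[x.toNat]'hxl) := by
    have h2 : PySem.List.pyGet? row.toList x = row.toList[x.toNat]? := by
      conv_lhs => rw [hx']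
      exact PySem.List.pyGet?_natCast _ _
    rw [h2]
    simp
  have hgd : PySem.List.pyGetD (row.toList.take w) x ' ' = row.toList[x.toNat]'hxl := by
    rw [PySem.List.pyGetD_eq_getElem _ ' ' hx0 (by rw [List.length_take]; omega)]
    simp [List.getElem_take]
  simp [Function.comp, PySem.Str.pyGet?, PySem.Chars.pyGet?, hget, hgd]

-- ===== VERDICT (by name: the statement is the Claim_ definition above) =====
theorem parse_spec : Claim_equal_parse := by
  intro input _ hpre
  unfold Spec_parse parse parse_alt
  simp only []
  -- rewrite B into flatMap form
  have hB : (PySem.List.enumerate input 0).foldl (fun acc p =>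
      (PySem.List.enumerate (p.2.toList.take (pvWidth input)) 0).foldl (fun acc2 q =>
        if q.2 = 'O' then (acc2.1 ++ [(q.1, p.1)], acc2.2)
        else if q.2 = '#' then (acc2.1, acc2.2 ++ [(q.1, p.1)]) else acc2) acc) ([], [])
      = (((PySem.List.enumerate input 0).flatMap (fun p =>
            (PySem.List.enumerate (p.2.toList.take (pvWidth input)) 0).filterMap
              (fun q => if q.2 = 'O' then some (q.1, p.1) else none))),
         ((PySem.List.enumerate input 0).flatMap (fun p =>
            (PySem.List.enumerate (p.2.toList.take (pvWidth input)) 0).filterMap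
              (fun q => if q.2 = '#' then some (q.1, p.1) else none)))) := by
    have hstep : (fun (acc : (List (Int × Int)) × (List (Int × Int))) (p : Int × String) =>
        (PySem.List.enumerate (p.2.toList.take (pvWidth input)) 0).foldl (fun acc2 q =>
          if q.2 = 'O' then (acc2.1 ++ [(q.1, p.1)], acc2.2)
          else if q.2 = '#' then (acc2.1, acc2.2 ++ [(q.1, p.1)]) else acc2) acc)
        = (fun acc p =>
          (acc.1 ++ (PySem.List.enumerate (p.2.toList.take (pvWidth input)) 0).filterMap
              (fun q => if q.2 = 'O' then some (q.1, p.1) else none),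
           acc.2 ++ (PySem.List.enumerate (p.2.toList.take (pvWidth input)) 0).filterMap
              (fun q => if q.2 = '#' then some (q.1, p.1) else none))) := by
      funext acc p
      exact inner_foldl p.1 _ acc
    rw [hstep, outer_foldl]
    simp
  rw [hB]
  -- rewrite A's two comprehensions into flatMaps over enumerate and compare row by row
  rw [a_to_enum input (fun y row => (PySem.List.pyRange 0 ((pvWidth input : Nat) : Int) 1).filterMap
        (fun x => if PySem.Str.pyGet? row x = some 'O' then some (x, y) else none)),
      a_to_enum input (fun y row => (PySem.List.pyRange 0 ((pvWidth input : Nat) : Int) 1).filterMap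
        (fun x => if PySem.Str.pyGet? row x = some '#' then some (x, y) else none))]
  rw [Prod.mk.injEq]
  constructor <;>
  · apply List.flatMap_congr
    intro p hp
    obtain ⟨k, hk, rfl⟩ := (PySem.List.mem_enumerate_iff input 0 p).1 hp
    exact row_eq _ _ _ _ (hpre _ (List.getElem_mem hk))
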